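-- pv_equiv track=rewrite | github.com/pusiyugithub/codes | Huawei_exercises/Python3_Implementations/密码验证合格程序.py | checkSubString
-- ===== SOURCE A (Python) =====
-- def checkSubString(password):
--     l = list()
--     for x in range(len(password)-2):
--         l.append(password[x:x+3])
--     s = set(l)
--     if len(l) == len(s):
--         return True
--     else:
--         return False
-- ===== SOURCE B (Python) =====
-- def checkSubString(password):
--     subs = sorted(password[x:x + 3] for x in range(len(password) - 2))
--     return all(a != b for a, b in zip(subs, subs[1:]))
-- ===== Notes on version B (the rewrite author's own statement) =====
-- stated objective: alternative
-- what changed: Replaces the hash-set/length-comparison test by sort-then-scan: sort the 3-char windows and report a repeat iff two adjacent sorted windows are equal.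
import Mathlib
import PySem

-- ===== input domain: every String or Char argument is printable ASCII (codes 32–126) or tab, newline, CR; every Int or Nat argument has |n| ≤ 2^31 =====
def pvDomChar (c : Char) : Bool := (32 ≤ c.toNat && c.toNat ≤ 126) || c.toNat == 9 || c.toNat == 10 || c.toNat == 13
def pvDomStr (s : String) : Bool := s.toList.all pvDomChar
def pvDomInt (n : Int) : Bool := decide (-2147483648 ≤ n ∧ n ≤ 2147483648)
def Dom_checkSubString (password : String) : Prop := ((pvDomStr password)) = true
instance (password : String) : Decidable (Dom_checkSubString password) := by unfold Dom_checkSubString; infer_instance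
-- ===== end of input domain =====

-- B replaces A's hash-set/length-comparison test by sort-then-scan (sort the windows,
-- a repeat shows up as two equal adjacent sorted windows); objective: alternative.

-- ===== PORT A =====
def checkSubString (password : String) : Bool :=
  let l : List String :=
    (PySem.List.pyRange 0 ((PySem.Str.len password : Int) - 2) 1).foldl
      (fun acc x => acc ++ [PySem.Str.slice password (some x) (some (x + 3))]) []
  let s : PySem.Set String := PySem.Set.ofList l
  if l.length = PySem.Set.len s then true else false

-- ===== PORT B =====
def checkSubString_alt (password : String) : Bool :=
  let subs : List String :=
    PySem.List.sorted
      ((PySem.List.pyRange 0 ((PySem.Str.len password : Int) - 2) 1).map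
        (fun x => PySem.Str.slice password (some x) (some (x + 3))))
      (fun s => s) false
  (subs.zip (PySem.List.slice subs (some 1) none)).all (fun p => p.1 ≠ p.2)

-- ===== PRECONDITION & SPEC =====
def Spec_checkSubString (password : String) (out : Bool) : Prop := out = checkSubString_alt password
instance (password : String) (out : Bool) : Decidable (Spec_checkSubString password out) := by unfold Spec_checkSubString; infer_instance

-- ===== CLAIM =====
def Claim_equal_checkSubString : Prop := ∀ (password : String), Dom_checkSubString password → Spec_checkSubString password (checkSubString password)

-- ===== LEMMAS AND PROOFS =====

-- A's loop builds exactly the map of the slice function over the index range.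
theorem pvFoldlAppendMap (f : Int → String) (idxs : List Int) (acc : List String) :
    idxs.foldl (fun a x => a ++ [f x]) acc = acc ++ idxs.map f := by
  induction idxs generalizing acc with
  | nil => simp
  | cons x rest ih => simp [List.foldl, ih]

theorem pvContainsFalse (seen : PySem.Set String) (y : String) (hy : y ∉ seen) :
    PySem.Set.contains seen y = false := by
  rcases Bool.eq_false_or_eq_true (PySem.Set.contains seen y) with h | h
  · exact absurd ((PySem.Set.contains_iff seen y).1 h) hy
  · exact h

theorem pvAddMem (seen : PySem.Set String) (y : String) (hy : y ∈ seen) :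
    PySem.Set.add seen y = seen := by
  simp only [PySem.Set.add, (PySem.Set.contains_iff seen y).2 hy, if_true]

theorem pvAddNotMem (seen : PySem.Set String) (y : String) (hy : y ∉ seen) :
    PySem.Set.add seen y = seen ++ [y] := by
  simp only [PySem.Set.add, pvContainsFalse seen y hy, Bool.false_eq_true, if_false]

theorem pvLenFoldlAddLe (ys : List String) (seen : PySem.Set String) :
    (ys.foldl PySem.Set.add seen).length ≤ seen.length + ys.length := by
  induction ys generalizing seen with
  | nil => simp
  | cons y rest ih =>
    simp only [List.foldl, List.length_cons]
    have h := ih (PySem.Set.add seen y)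
    have hlen : (PySem.Set.add seen y).length ≤ seen.length + 1 := by
      by_cases hy : y ∈ seen
      · rw [pvAddMem seen y hy]; omega
      · rw [pvAddNotMem seen y hy]; simp
    omega

-- length of the folded set equals seen.length + ys.length iff ys has no duplicates and avoids seen
theorem pvLenFoldlAddEq (ys : List String) (seen : PySem.Set String) :
    (ys.foldl PySem.Set.add seen).length = seen.length + ys.length ↔
      (ys.Nodup ∧ ∀ y ∈ ys, y ∉ seen) := by
  induction ys generalizing seen with
  | nil => simp
  | cons y rest ih =>
    simp only [List.foldl, List.length_cons]
    by_cases hy : y ∈ seen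
    · rw [pvAddMem seen y hy]
      constructor
      · intro h
        exfalso
        have := pvLenFoldlAddLe rest seen
        omega
      · rintro ⟨-, hall⟩
        exact absurd hy (hall y (by simp))
    · rw [pvAddNotMem seen y hy]
      have hih := ih (seen ++ [y])
      simp only [List.length_append, List.length_singleton] at hih
      rw [show seen.length + (rest.length + 1) = seen.length + 1 + rest.length by omega, hih]
      simp only [List.nodup_cons]
      constructor
      · rintro ⟨hnd, hall⟩
        refine ⟨⟨?_, hnd⟩, ?_⟩
        · intro a
          exact hall y a (by simp)
        · aesop
      · rintro ⟨⟨hyr, hnd⟩, hall⟩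
        refine ⟨hnd, ?_⟩
        aesop

-- A returns exactly "the window list has no duplicate"
theorem pvAEqNodup (password : String) :
    checkSubString password =
      decide ((PySem.List.pyRange 0 ((PySem.Str.len password : Int) - 2) 1).map
        (fun x => PySem.Str.slice password (some x) (some (x + 3)))).Nodup := by
  unfold checkSubString
  set f : Int → String := fun x => PySem.Str.slice password (some x) (some (x + 3)) with hf
  set idxs := PySem.List.pyRange 0 ((PySem.Str.len password : Int) - 2) 1 with hidxs
  simp only
  rw [pvFoldlAppendMap f idxs []]
  simp only [List.nil_append]
  have hofl : PySem.Set.ofList (idxs.map f) = (idxs.map f).foldl PySem.Set.add PySem.Set.empty :=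
    PySem.Set.ofList_eq_foldl _
  have hlen := pvLenFoldlAddEq (idxs.map f) PySem.Set.empty
  simp only [PySem.Set.empty] at hlen hofl
  by_cases hnd : (idxs.map f).Nodup
  · rw [if_pos, decide_eq_true hnd]
    rw [show PySem.Set.len (PySem.Set.ofList (idxs.map f)) = (PySem.Set.ofList (idxs.map f)).length from rfl, hofl]
    have := hlen.2 ⟨hnd, fun y _ h => by simp at h⟩
    simpa using this.symm
  · rw [if_neg, decide_eq_false hnd]
    rw [show PySem.Set.len (PySem.Set.ofList (idxs.map f)) = (PySem.Set.ofList (idxs.map f)).length from rfl, hofl]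
    intro heq
    have := hlen.1 (by simpa using heq.symm)
    exact hnd this.1

-- for a nondecreasing list, the adjacent-pairs scan decides Nodup
theorem pvZipAllNodup (ys : List String) (hle : ys.Pairwise (· ≤ ·)) :
    ((ys.zip ys.tail).all (fun p => p.1 ≠ p.2)) = decide ys.Nodup := by
  induction ys with
  | nil => simp
  | cons y rest ih =>
    cases rest with
    | nil => simp
    | cons z rest' =>
      rw [List.pairwise_cons] at hle
      have ihz := ih hle.2
      simp only [List.tail_cons, List.zip_cons_cons, List.all_cons] at ihz ⊢
      rw [ihz]
      by_cases hyz : y = z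
      · subst hyz
        simp [List.nodup_cons]
      · have hymem : y ∉ z :: rest' := by
          intro hmem
          rcases List.mem_cons.1 hmem with h | h
          · exact hyz h
          · have h1 : y ≤ z := hle.1 z (List.mem_cons_self ..)
            have h2 : z ≤ y := ((List.pairwise_cons.1 hle.2).1 y h)
            exact hyz (le_antisymm h1 h2)
        simp [List.nodup_cons, hyz, hymem]

-- ===== VERDICT =====
theorem checkSubString_spec : Claim_equal_checkSubString := by
  intro password _
  unfold Spec_checkSubString
  rw [pvAEqNodup]
  unfold checkSubString_alt
  set ws := (PySem.List.pyRange 0 ((PySem.Str.len password : Int) - 2) 1).map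
      (fun x => PySem.Str.slice password (some x) (some (x + 3))) with hws
  simp only
  set subs := PySem.List.sorted ws (fun s => s) false with hsubs
  have hle : subs.Pairwise (· ≤ ·) := PySem.List.sorted_pairwise ws (fun s => s)
  have hperm : subs.Perm ws := PySem.List.sorted_perm ws (fun s => s) false
  rw [PySem.List.slice_from_one, pvZipAllNodup subs hle]
  simp only [decide_eq_decide]; exact hperm.nodup_iff.symm
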